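-- pv_equiv track=rewrite | github.com/Kushagraw12/Competitive-Programming | DAP/c1/w2/5_fibonacci_number_again/fibonacci_huge.py | solve
-- ===== SOURCE A (Python) =====
-- def solve(n, m):
--         n1 = 0
--         n2 = 1
--         a = []
--         for i in range(n - 1):
--                 a.append(n1 + n2)
--                 n1, n2 = n2, n1 + n2
--         if len(a) != 0:
--                 return (max(a) % m)
--         else:
--                 return 0
-- ===== SOURCE B (Python) =====
-- def solve(n, m):
--     # Fibonacci fast doubling mod |m|, then Python-mod m; O(log n) instead of A's linear list build.
--     if n < 2:
--         return 0
--     am = -m if m < 0 else m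
--
--     def fd(k):
--         # returns (fib(k) % am, fib(k+1) % am)
--         if k == 0:
--             return (0, 1 % am)
--         a, b = fd(k // 2)
--         c = a * (2 * b - a) % am
--         d = (a * a + b * b) % am
--         if k % 2 == 1:
--             return (d, (c + d) % am)
--         return (c, d)
--
--     return fd(n)[0] % m
-- ===== Notes on version B (the rewrite author's own statement) =====
-- stated objective: faster
-- what changed: A builds the whole list of Fibonacci numbers up to F(n) with big-int additions and takes its max; B computes F(n) mod |m| directly by the fast-doubling recursion and never materialises any list.
import Mathlib
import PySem

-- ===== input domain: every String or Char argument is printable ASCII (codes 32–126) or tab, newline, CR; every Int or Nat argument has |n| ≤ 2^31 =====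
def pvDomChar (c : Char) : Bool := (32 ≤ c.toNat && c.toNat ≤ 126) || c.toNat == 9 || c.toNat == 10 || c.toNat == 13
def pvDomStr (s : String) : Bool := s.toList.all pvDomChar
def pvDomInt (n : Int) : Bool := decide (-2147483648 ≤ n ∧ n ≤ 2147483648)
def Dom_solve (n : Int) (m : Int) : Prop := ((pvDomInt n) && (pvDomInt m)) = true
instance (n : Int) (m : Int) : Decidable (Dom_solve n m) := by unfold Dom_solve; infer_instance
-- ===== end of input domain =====

-- B replaces A's build-the-whole-Fibonacci-list-then-max with the fast-doubling recursion
-- for fib(n) mod |m| (objective: faster, asymptotic — A does n big-int additions, B O(log n) steps).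

-- ===== PORT A =====
-- literal port of A: fold over range(n-1) carrying (n1, n2, a), then max(a) % m if a nonempty.
def solve (n : Int) (m : Int) : Int :=
  let s := (PySem.List.pyRange 0 (n - 1) 1).foldl
    (fun (s : Int × Int × List Int) _ => (s.2.1, s.1 + s.2.1, s.2.2 ++ [s.1 + s.2.1]))
    (0, 1, [])
  if s.2.2.length ≠ 0 then
    match PySem.List.max? s.2.2 (fun x => x) with
    | some v => PySem.Int.mod v m
    | none => 0   -- unreachable: the length guard makes the list nonempty
  else 0

-- ===== PORT B =====
-- Source B's fd: fast doubling, fdB am k = (fib k % am, fib (k+1) % am)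
def fdB (am : Int) (k : Nat) : Int × Int :=
  if hk : k = 0 then (0, PySem.Int.mod 1 am)
  else
    let p := fdB am (k / 2)
    let a := p.1
    let b := p.2
    let c := PySem.Int.mod (a * (2 * b - a)) am
    let d := PySem.Int.mod (a * a + b * b) am
    if k % 2 = 1 then (d, PySem.Int.mod (c + d) am) else (c, d)
  termination_by k
  decreasing_by exact Nat.div_lt_self (Nat.pos_of_ne_zero hk) (by omega)

def solve_alt (n : Int) (m : Int) : Int :=
  if n < 2 then 0
  else PySem.Int.mod (fdB (if m < 0 then -m else m) n.toNat).1 m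

-- ===== PRECONDITION & SPEC =====
-- Pre_ excludes exactly the inputs where A raises ZeroDivisionError: m = 0 with n ≥ 2.
def Pre_solve (n : Int) (m : Int) : Prop := 2 ≤ n → m ≠ 0
instance (n : Int) (m : Int) : Decidable (Pre_solve n m) := by unfold Pre_solve; infer_instance
def pvWitness_solve : Int × Int := (10, 7)
def Spec_solve (n : Int) (m : Int) (out : Int) : Prop := out = solve_alt n m
instance (n : Int) (m : Int) (out : Int) : Decidable (Spec_solve n m out) := by unfold Spec_solve; infer_instance

-- ===== CLAIM (what is proved, stated in full; the proofs are below) =====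
def Claim_equal_solve : Prop := ∀ (n : Int) (m : Int), Dom_solve n m → Pre_solve n m → Spec_solve n m (solve n m)

-- ===== LEMMAS AND PROOFS =====

-- A's loop ignores the range elements: after a list of length L starting from (fib k, fib (k+1), acc)
-- it reaches (fib (k+L), fib (k+L+1)) having appended fib (k+2), …, fib (k+L+1).
theorem solveA_loop (l : List Int) (k : Nat) (acc : List Int) :
    l.foldl (fun (s : Int × Int × List Int) _ => (s.2.1, s.1 + s.2.1, s.2.2 ++ [s.1 + s.2.1]))
      ((Nat.fib k : Int), (Nat.fib (k + 1) : Int), acc)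
    = ((Nat.fib (k + l.length) : Int), (Nat.fib (k + l.length + 1) : Int),
       acc ++ (List.range l.length).map (fun i => ((Nat.fib (k + 2 + i) : Nat) : Int))) := by
  induction l generalizing k acc with
  | nil => simp
  | cons x t ih =>
    simp only [List.foldl_cons]
    have hfib : (Nat.fib k : Int) + (Nat.fib (k + 1) : Int) = (Nat.fib (k + 1 + 1) : Int) := by
      rw [Nat.fib_add_two]; push_cast; ring
    show List.foldl _ ((Nat.fib (k + 1) : Int), (Nat.fib k : Int) + (Nat.fib (k + 1) : Int),
        acc ++ [(Nat.fib k : Int) + (Nat.fib (k + 1) : Int)]) t = _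
    rw [hfib, ih (k + 1) (acc ++ [(Nat.fib (k + 1 + 1) : Int)])]
    refine Prod.ext ?_ (Prod.ext ?_ ?_)
    · show ((Nat.fib (k + 1 + t.length) : Nat) : Int) = ((Nat.fib (k + (x :: t).length) : Nat) : Int)
      simp only [List.length_cons]
      congr 2
      omega
    · show ((Nat.fib (k + 1 + t.length + 1) : Nat) : Int) = ((Nat.fib (k + (x :: t).length + 1) : Nat) : Int)
      simp only [List.length_cons]
      congr 2
      omega
    · show acc ++ [((Nat.fib (k + 1 + 1) : Nat) : Int)]
          ++ (List.range t.length).map (fun i => ((Nat.fib (k + 1 + 2 + i) : Nat) : Int))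
        = acc ++ (List.range (x :: t).length).map (fun i => ((Nat.fib (k + 2 + i) : Nat) : Int))
      simp only [List.length_cons, List.range_succ_eq_map, List.map_cons, List.map_map,
        List.append_assoc, List.singleton_append]
      have hmap : (List.range t.length).map (fun i => ((Nat.fib (k + 1 + 2 + i) : Nat) : Int))
          = (List.range t.length).map ((fun i => ((Nat.fib (k + 2 + i) : Nat) : Int)) ∘ Nat.succ) := by
        apply List.map_congr_left
        intro i _
        simp only [Function.comp_apply]
        rw [show k + 1 + 2 + i = k + 2 + Nat.succ i from by omega]
      rw [hmap, show k + 1 + 1 = k + 2 + 0 from by omega]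

-- Python max of the list A builds is its last element, fib (L+1)
theorem maxA (L : Nat) (hL : 1 ≤ L) :
    PySem.List.max? ((List.range L).map (fun i => ((Nat.fib (2 + i) : Nat) : Int))) (fun x => x)
      = some ((Nat.fib (L + 1) : Nat) : Int) := by
  have hne : (List.range L).map (fun i => ((Nat.fib (2 + i) : Nat) : Int)) ≠ [] := by
    simp
    omega
  cases hmax : PySem.List.max? ((List.range L).map (fun i => ((Nat.fib (2 + i) : Nat) : Int))) (fun x => x) with
  | none => exact absurd ((PySem.List.max?_eq_none_iff _ _).mp hmax) hne
  | some v =>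
    have hmemLast : ((Nat.fib (L + 1) : Nat) : Int) ∈
        (List.range L).map (fun i => ((Nat.fib (2 + i) : Nat) : Int)) := by
      refine List.mem_map.mpr ⟨L - 1, List.mem_range.mpr (by omega), ?_⟩
      rw [show 2 + (L - 1) = L + 1 from by omega]
    obtain ⟨i, hi, hvi⟩ := List.mem_map.mp (PySem.List.max?_mem hmax)
    have h1 : v ≤ ((Nat.fib (L + 1) : Nat) : Int) := by
      rw [← hvi]
      exact_mod_cast Nat.fib_mono (by simp at hi; omega)
    have h2 : ((Nat.fib (L + 1) : Nat) : Int) ≤ v := PySem.List.max?_isMax hmax _ hmemLast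
    congr 1
    omega

-- A computes fib(n) % m (Python mod) for n ≥ 2, and 0 otherwise
theorem solveA_eq (n m : Int) :
    solve n m = if 2 ≤ n then PySem.Int.mod ((Nat.fib n.toNat : Nat) : Int) m else 0 := by
  unfold solve
  have h0 : ((0 : Int), (1 : Int), ([] : List Int))
      = ((Nat.fib 0 : Int), (Nat.fib (0 + 1) : Int), ([] : List Int)) := by norm_num
  rw [h0, solveA_loop]
  simp only [List.nil_append, Nat.zero_add]
  by_cases hn : 2 ≤ n
  · have hlen : (PySem.List.pyRange 0 (n - 1) 1).length = (n - 1).toNat := by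
      simpa using PySem.List.length_pyRange_one 0 (n - 1)
    have hL : 1 ≤ (PySem.List.pyRange 0 (n - 1) 1).length := by rw [hlen]; omega
    rw [if_pos (by simp only [List.length_map, List.length_range]; omega)]
    rw [show (fun i => ((Nat.fib (0 + 2 + i) : Nat) : Int)) = (fun i => ((Nat.fib (2 + i) : Nat) : Int)) from by
      funext i; rw [Nat.zero_add]]
    rw [maxA _ hL]
    rw [if_pos hn, hlen, show (n - 1).toNat + 1 = n.toNat from by omega]
  · have hnil : PySem.List.pyRange 0 (n - 1) 1 = [] :=
      PySem.List.pyRange_one_eq_nil (by omega)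
    rw [hnil]
    simp [hn]

-- Python's % m (Int.fmod) only depends on the residue class mod m
theorem fmod_congr (x y m : Int) (h : m ∣ x - y) : Int.fmod x m = Int.fmod y m := by
  obtain ⟨t, ht⟩ := h
  have hx : x = y + m * t := by omega
  rw [hx, Int.add_mul_fmod_self_left]

-- fast-doubling correctness: fdB computes (fib k % am, fib (k+1) % am) for am > 0
theorem fdB_eq (am : Int) (ham : 0 < am) : ∀ (k : Nat),
    fdB am k = (((Nat.fib k : Nat) : Int) % am, ((Nat.fib (k + 1) : Nat) : Int) % am) := by
  intro k
  induction k using Nat.strong_induction_on with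
  | _ k ih =>
    rw [fdB]
    by_cases hk : k = 0
    · subst hk
      simp [PySem.Int.mod_eq_emod_of_pos ham]
    · rw [dif_neg hk]
      have ihh := ih (k / 2) (Nat.div_lt_self (Nat.pos_of_ne_zero hk) (by omega))
      set h := k / 2 with hh
      set X : Int := ((Nat.fib h : Nat) : Int) with hX
      set Y : Int := ((Nat.fib (h + 1) : Nat) : Int) with hY
      have hmodc : ∀ z : Int, PySem.Int.mod z am = z % am := fun z =>
        PySem.Int.mod_eq_emod_of_pos ham
      have hXm : X % am ≡ X [ZMOD am] := Int.emod_emod_of_dvd X dvd_rfl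
      have hYm : Y % am ≡ Y [ZMOD am] := Int.emod_emod_of_dvd Y dvd_rfl
      have hc : ((X % am) * (2 * (Y % am) - X % am)) % am = (X * (2 * Y - X)) % am :=
        hXm.mul (((Int.ModEq.refl 2).mul hYm).sub hXm)
      have hd : ((X % am) * (X % am) + (Y % am) * (Y % am)) % am = (X * X + Y * Y) % am :=
        (hXm.mul hXm).add (hYm.mul hYm)
      have hfib2h : ((Nat.fib (2 * h) : Nat) : Int) = X * (2 * Y - X) := by
        have hle : Nat.fib h ≤ 2 * Nat.fib (h + 1) :=
          le_trans Nat.fib_le_fib_succ (by omega)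
        rw [hX, hY, Nat.fib_two_mul, Nat.cast_mul, Nat.cast_sub hle]
        push_cast
        ring
      have hfib2h1 : ((Nat.fib (2 * h + 1) : Nat) : Int) = X * X + Y * Y := by
        rw [hX, hY, Nat.fib_two_mul_add_one]
        push_cast
        ring
      have hfib2h2 : ((Nat.fib (2 * h + 2) : Nat) : Int) = X * (2 * Y - X) + (X * X + Y * Y) := by
        rw [show 2 * h + 2 = 2 * h + 1 + 1 from rfl, Nat.fib_add_two]
        push_cast [← hfib2h, ← hfib2h1]
        ring
      simp only [ihh, hmodc]
      by_cases hpar : k % 2 = 1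
      · rw [if_pos hpar]
        have hk2 : k = 2 * h + 1 := by omega
        refine Prod.ext ?_ ?_
        · show (X % am * (X % am) + Y % am * (Y % am)) % am = ((Nat.fib k : Nat) : Int) % am
          rw [hd, hk2, hfib2h1]
        · show ((X % am * (2 * (Y % am) - X % am)) % am + (X % am * (X % am) + Y % am * (Y % am)) % am) % am
              = ((Nat.fib (k + 1) : Nat) : Int) % am
          rw [hc, hd]
          have e1 : (X * (2 * Y - X)) % am ≡ X * (2 * Y - X) [ZMOD am] :=
            Int.emod_emod_of_dvd _ dvd_rfl
          have e2 : (X * X + Y * Y) % am ≡ X * X + Y * Y [ZMOD am] :=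
            Int.emod_emod_of_dvd _ dvd_rfl
          have e3 : ((X * (2 * Y - X)) % am + (X * X + Y * Y) % am) % am
              = (X * (2 * Y - X) + (X * X + Y * Y)) % am := e1.add e2
          rw [e3, hk2, show 2 * h + 1 + 1 = 2 * h + 2 from rfl, hfib2h2]
      · rw [if_neg hpar]
        have hk2 : k = 2 * h := by omega
        refine Prod.ext ?_ ?_
        · show (X % am * (2 * (Y % am) - X % am)) % am = ((Nat.fib k : Nat) : Int) % am
          rw [hc, hk2, hfib2h]
        · show (X % am * (X % am) + Y % am * (Y % am)) % am = ((Nat.fib (k + 1) : Nat) : Int) % am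
          rw [hd, hk2, hfib2h1]

-- ===== VERDICT (by name: the statement is the Claim_ definition above) =====
theorem solve_spec : Claim_equal_solve := by
  intro n m _ hpre
  unfold Spec_solve
  rw [solveA_eq]
  unfold solve_alt
  by_cases hn : 2 ≤ n
  · rw [if_pos hn, if_neg (by omega)]
    have hm : m ≠ 0 := hpre hn
    have ham : (0 : Int) < (if m < 0 then -m else m) := by
      split_ifs with h <;> omega
    rw [fdB_eq _ ham]
    show Int.fmod ((Nat.fib n.toNat : Nat) : Int) m
        = Int.fmod (((Nat.fib n.toNat : Nat) : Int) % (if m < 0 then -m else m)) m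
    apply fmod_congr
    have h1 : (if m < 0 then -m else m) ∣
        ((Nat.fib n.toNat : Nat) : Int) - ((Nat.fib n.toNat : Nat) : Int) % (if m < 0 then -m else m) := by
      rw [Int.emod_def]
      exact ⟨((Nat.fib n.toNat : Nat) : Int) / (if m < 0 then -m else m), by ring⟩
    have h2 : m ∣ (if m < 0 then -m else m) := by
      split_ifs with h
      · exact ⟨-1, by ring⟩
      · exact ⟨1, by ring⟩
    exact dvd_trans h2 h1
  · rw [if_neg hn, if_pos (by omega)]
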